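-- pv_equiv track=rewrite | github.com/CallMeDas/Python-Practice-Set | PracticeSet-2/12_MatrixOfFibo.py | generate_fibonacci_matrix
-- ===== SOURCE A (Python) =====
-- def generate_fibonacci_matrix(size):
--     fib_sequence = [0, 1]
--     while len(fib_sequence) < (size * size + 1):
--         fib_sequence.append(fib_sequence[-1] + fib_sequence[-2])
--
--     matrix = []
--     index = 1
--     for i in range(size):
--         row = []
--         for j in range(size):
--             row.append(fib_sequence[index])
--             index += 1
--         matrix.append(row)
--
--     return matrix
-- ===== SOURCE B (Python) =====
-- def generate_fibonacci_matrix(size):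
--     prev, curr = 0, 1
--     matrix = []
--     for _ in range(size):
--         row = []
--         for _ in range(size):
--             row.append(curr)
--             prev, curr = curr, prev + curr
--         matrix.append(row)
--     return matrix
-- ===== Notes on version B (the rewrite author's own statement) =====
-- stated objective: simpler
-- what changed: Drops the precomputed fib_sequence list (built by a while-loop and then indexed with a running index) and instead carries two running scalars prev/curr through a single nested loop, emitting curr for each cell.
import Mathlib
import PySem

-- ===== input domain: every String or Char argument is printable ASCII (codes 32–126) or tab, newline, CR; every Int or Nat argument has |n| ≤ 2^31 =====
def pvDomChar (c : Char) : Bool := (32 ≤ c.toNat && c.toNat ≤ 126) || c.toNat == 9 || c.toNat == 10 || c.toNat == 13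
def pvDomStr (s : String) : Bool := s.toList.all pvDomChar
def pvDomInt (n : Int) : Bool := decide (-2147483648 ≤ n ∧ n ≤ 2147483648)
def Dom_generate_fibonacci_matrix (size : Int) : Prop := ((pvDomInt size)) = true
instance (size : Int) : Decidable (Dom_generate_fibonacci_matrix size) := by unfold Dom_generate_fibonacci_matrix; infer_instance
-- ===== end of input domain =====

-- B replaces A's precomputed fib_sequence table (while-loop build + indexed reads) by two
-- running scalars prev/curr updated in a single nested pass (objective: simpler).

-- ===== PORT A =====
-- the while-loop building fib_sequence; the list always has ≥ 2 elements, so the Python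
-- negative indexing fib_sequence[-1] / fib_sequence[-2] never raises (pyGetD default unreachable)
-- while len(fib_sequence) < target: each iteration appends one element, so the loop runs
-- exactly (target - len).toNat times; ported as structural recursion on that count (fuel)
def pvBuildFibGo : Nat → List Int → List Int
  | 0, xs => xs
  | fuel+1, xs => pvBuildFibGo fuel (xs ++ [PySem.List.pyGetD xs (-1) 0 + PySem.List.pyGetD xs (-2) 0])

def pvBuildFib (target : Int) (xs : List Int) : List Int :=
  pvBuildFibGo (target - xs.length).toNat xs

def generate_fibonacci_matrix (size : Int) : List (List Int) :=
  let fib_sequence := pvBuildFib (size * size + 1) [0, 1]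
  -- index fib_sequence[index]: always in range (index ≤ size*size < len), default unreachable
  let res := (PySem.List.pyRange 0 size 1).foldl
    (fun (st : Int × List (List Int)) _ =>
      let inner := (PySem.List.pyRange 0 size 1).foldl
        (fun (st2 : Int × List Int) _ =>
          (st2.1 + 1, st2.2 ++ [PySem.List.pyGetD fib_sequence st2.1 0]))
        (st.1, [])
      (inner.1, st.2 ++ [inner.2]))
    (1, [])
  res.2

-- ===== PORT B =====
def generate_fibonacci_matrix_alt (size : Int) : List (List Int) :=
  let res := (PySem.List.pyRange 0 size 1).foldl
    (fun (st : (Int × Int) × List (List Int)) _ =>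
      let inner := (PySem.List.pyRange 0 size 1).foldl
        (fun (st2 : (Int × Int) × List Int) _ =>
          ((st2.1.2, st2.1.1 + st2.1.2), st2.2 ++ [st2.1.2]))
        (st.1, [])
      (inner.1, st.2 ++ [inner.2]))
    ((0, 1), [])
  res.2

-- ===== PRECONDITION & SPEC =====
def Spec_generate_fibonacci_matrix (size : Int) (out : List (List Int)) : Prop := out = generate_fibonacci_matrix_alt size
instance (size : Int) (out : List (List Int)) : Decidable (Spec_generate_fibonacci_matrix size out) := by unfold Spec_generate_fibonacci_matrix; infer_instance

-- ===== CLAIM (what is proved, stated in full; the proofs are below) =====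
def Claim_equal_generate_fibonacci_matrix : Prop := ∀ (size : Int), Dom_generate_fibonacci_matrix size → Spec_generate_fibonacci_matrix size (generate_fibonacci_matrix size)

-- ===== LEMMAS AND PROOFS =====

def pvFib : Nat → Int
  | 0 => 0
  | 1 => 1
  | n + 2 => pvFib n + pvFib (n + 1)

def pvFibs (m : Nat) : List Int := (List.range m).map pvFib

lemma pvFibs_length (m : Nat) : (pvFibs m).length = m := by simp [pvFibs]

lemma pvFibs_succ (m : Nat) : pvFibs (m + 1) = pvFibs m ++ [pvFib m] := by
  simp [pvFibs, List.range_succ]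

lemma foldl_const {α β : Type} (f : α → α) (l : List β) (s : α) :
    l.foldl (fun s _ => f s) s = f^[l.length] s := by
  induction l generalizing s with
  | nil => rfl
  | cons x xs ih => simp [List.foldl_cons, ih, Function.iterate_succ_apply]

lemma pvBuildFibGo_fibs : ∀ (fuel m : Nat), 2 ≤ m →
    pvBuildFibGo fuel (pvFibs m) = pvFibs (m + fuel) := by
  intro fuel
  induction fuel with
  | zero => intro m hm; rfl
  | succ fuel ih =>
    intro m hm
    obtain ⟨k, rfl⟩ : ∃ k, m = k + 2 := ⟨m - 2, by omega⟩
    rw [pvBuildFibGo]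
    have h1 : PySem.List.pyGetD (pvFibs (k+2)) (-1) 0 = pvFib (k+1) := by
      rw [PySem.List.pyGetD_neg_ofNat _ 1 0 (by omega) (by rw [pvFibs_length]; omega)]
      simp [pvFibs]
    have h2 : PySem.List.pyGetD (pvFibs (k+2)) (-2) 0 = pvFib k := by
      rw [PySem.List.pyGetD_neg_ofNat _ 2 0 (by omega) (by rw [pvFibs_length]; omega)]
      simp [pvFibs]
    rw [h1, h2]
    have hs : pvFib (k+1) + pvFib k = pvFib (k+2) := by
      rw [show pvFib (k+2) = pvFib k + pvFib (k+1) from rfl]; ring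
    rw [hs, ← pvFibs_succ]
    rw [ih (k+3) (by omega)]
    congr 1
    omega

lemma map_fib_range_succ (v c : Nat) :
    (List.range (c+1)).map (fun j => pvFib (v + j))
      = pvFib v :: (List.range c).map (fun j => pvFib (v + 1 + j)) := by
  rw [List.range_succ_eq_map]
  simp [List.map_map]
  intro a _
  congr 1
  omega

lemma cellsA (L : List Int) (n : Nat)
    (H : ∀ k : Nat, k ≤ n * n → PySem.List.pyGetD L (k : Int) 0 = pvFib k) :
    ∀ (c k : Nat) (row : List Int), k + c ≤ n * n →
      (fun (st2 : Int × List Int) =>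
          (st2.1 + 1, st2.2 ++ [PySem.List.pyGetD L st2.1 0]))^[c] (((k : Int) + 1), row)
        = (((k + c : Nat) : Int) + 1, row ++ (List.range c).map (fun j => pvFib (k + 1 + j))) := by
  intro c
  induction c with
  | zero => intro k row h; simp
  | succ c ih =>
    intro k row h
    rw [Function.iterate_succ_apply]
    have hk1 : ((k : Int) + 1) = ((k + 1 : Nat) : Int) := by push_cast; ring
    have hget : PySem.List.pyGetD L ((k : Int) + 1) 0 = pvFib (k + 1) := by
      rw [hk1]; exact H (k+1) (by omega)
    simp only [hget]
    rw [hk1, ih (k+1) (row ++ [pvFib (k+1)]) (by omega)]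
    rw [map_fib_range_succ (k+1) c]
    have : k + 1 + c = k + (c + 1) := by omega
    rw [this]
    simp

lemma cellsB :
    ∀ (c k : Nat) (rowB : List Int),
      (fun (st2 : (Int × Int) × List Int) =>
          ((st2.1.2, st2.1.1 + st2.1.2), st2.2 ++ [st2.1.2]))^[c] ((pvFib k, pvFib (k + 1)), rowB)
        = ((pvFib (k + c), pvFib (k + c + 1)), rowB ++ (List.range c).map (fun j => pvFib (k + 1 + j))) := by
  intro c
  induction c with
  | zero => intro k rowB; simp
  | succ c ih =>
    intro k rowB
    rw [Function.iterate_succ_apply]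
    have hs : pvFib k + pvFib (k + 1) = pvFib (k + 1 + 1) := rfl
    simp only [hs]
    rw [ih (k+1) (rowB ++ [pvFib (k+1)])]
    rw [map_fib_range_succ (k+1) c]
    have : k + 1 + c = k + (c + 1) := by omega
    rw [this]
    simp

lemma map_range_succ_shift {α : Type} (g : Nat → α) (r : Nat) :
    (List.range (r+1)).map g = g 0 :: (List.range r).map (fun i => g (i+1)) := by
  rw [List.range_succ_eq_map]
  simp [List.map_map]

lemma pvMulLe (k n : Nat) (h : k + 1 ≤ n) : k * n + n ≤ n * n := by
  have h2 := Nat.mul_le_mul_right n h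
  calc k * n + n = (k + 1) * n := by ring
    _ ≤ n * n := h2

lemma rowsA (L : List Int) (n : Nat)
    (H : ∀ k : Nat, k ≤ n * n → PySem.List.pyGetD L (k : Int) 0 = pvFib k) :
    ∀ (r k : Nat) (M : List (List Int)), k + r ≤ n →
      (fun (st : Int × List (List Int)) =>
        ((( fun (st2 : Int × List Int) =>
            (st2.1 + 1, st2.2 ++ [PySem.List.pyGetD L st2.1 0]))^[n] (st.1, [])).1,
         st.2 ++ [(( fun (st2 : Int × List Int) =>
            (st2.1 + 1, st2.2 ++ [PySem.List.pyGetD L st2.1 0]))^[n] (st.1, [])).2]))^[r]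
        (((k * n : Nat) : Int) + 1, M)
      = (((((k + r) * n : Nat) : Int) + 1),
         M ++ (List.range r).map (fun i => (List.range n).map (fun j => pvFib ((k + i) * n + 1 + j)))) := by
  intro r
  induction r with
  | zero => intro k M h; simp
  | succ r ih =>
    intro k M h
    simp only [Function.iterate_succ_apply]
    rw [cellsA L n H n (k * n) [] (pvMulLe k n (by omega))]
    have h1 : k * n + n = (k + 1) * n := by ring
    rw [h1, List.nil_append]
    rw [ih (k+1) (M ++ [(List.range n).map (fun j => pvFib (k * n + 1 + j))]) (by omega)]
    rw [map_range_succ_shift (fun i => (List.range n).map (fun j => pvFib ((k + i) * n + 1 + j))) r]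
    have h2 : k + 1 + r = k + (r + 1) := by omega
    rw [h2]
    have h3 : (fun i => (List.range n).map (fun j => pvFib ((k + (i+1)) * n + 1 + j)))
            = (fun i => (List.range n).map (fun j => pvFib ((k + 1 + i) * n + 1 + j))) := by
      funext i; congr 1; funext j; congr 1; ring
    rw [h3]
    simp

lemma rowsB (n : Nat) :
    ∀ (r k : Nat) (M : List (List Int)),
      (fun (st : (Int × Int) × List (List Int)) =>
        ((( fun (st2 : (Int × Int) × List Int) =>
            ((st2.1.2, st2.1.1 + st2.1.2), st2.2 ++ [st2.1.2]))^[n] (st.1, [])).1,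
         st.2 ++ [(( fun (st2 : (Int × Int) × List Int) =>
            ((st2.1.2, st2.1.1 + st2.1.2), st2.2 ++ [st2.1.2]))^[n] (st.1, [])).2]))^[r]
        ((pvFib (k * n), pvFib (k * n + 1)), M)
      = ((pvFib ((k + r) * n), pvFib ((k + r) * n + 1)),
         M ++ (List.range r).map (fun i => (List.range n).map (fun j => pvFib ((k + i) * n + 1 + j)))) := by
  intro r
  induction r with
  | zero => intro k M; simp
  | succ r ih =>
    intro k M
    simp only [Function.iterate_succ_apply]
    rw [cellsB n (k * n) []]
    have h1 : k * n + n = (k + 1) * n := by ring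
    rw [h1, List.nil_append]
    rw [ih (k+1) (M ++ [(List.range n).map (fun j => pvFib (k * n + 1 + j))])]
    rw [map_range_succ_shift (fun i => (List.range n).map (fun j => pvFib ((k + i) * n + 1 + j))) r]
    have h2 : k + 1 + r = k + (r + 1) := by omega
    rw [h2]
    have h3 : (fun i => (List.range n).map (fun j => pvFib ((k + (i+1)) * n + 1 + j)))
            = (fun i => (List.range n).map (fun j => pvFib ((k + 1 + i) * n + 1 + j))) := by
      funext i; congr 1; funext j; congr 1; ring
    rw [h3]
    simp

lemma pvFibs_getD (m k : Nat) (hk : k < m) : (pvFibs m).getD k 0 = pvFib k := by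
  simp [pvFibs, List.getD_eq_getElem?_getD, hk]

-- ===== VERDICT (by name: the statement is the Claim_ definition above) =====
theorem generate_fibonacci_matrix_spec : Claim_equal_generate_fibonacci_matrix := by
  intro size _
  unfold Spec_generate_fibonacci_matrix
  unfold generate_fibonacci_matrix generate_fibonacci_matrix_alt
  simp only [foldl_const, PySem.List.length_pyRange_one, sub_zero]
  by_cases hn : size ≤ 0
  · have h0 : size.toNat = 0 := by omega
    rw [h0]
    simp
  · set n := size.toNat with hn_def
    have hsz : (n : Int) = size := by omega
    have hnn : 0 < n * n := Nat.mul_pos (by omega) (by omega)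
    have hL : pvBuildFib (size * size + 1) [0, 1] = pvFibs (n * n + 1) := by
      unfold pvBuildFib
      rw [show ([0, 1] : List Int) = pvFibs 2 from rfl]
      rw [pvFibs_length, pvBuildFibGo_fibs _ 2 (le_refl 2)]
      have ht : (size * size + 1) = ((n * n + 1 : Nat) : Int) := by rw [← hsz]; push_cast; ring
      rw [ht]
      congr 1
      omega
    have H : ∀ k : Nat, k ≤ n * n → PySem.List.pyGetD (pvFibs (n * n + 1)) (k : Int) 0 = pvFib k := by
      intro k hk
      rw [PySem.List.pyGetD_natCast]
      exact pvFibs_getD _ _ (by omega)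
    rw [hL]
    have hA := rowsA (pvFibs (n * n + 1)) n H n 0 [] (by omega)
    have hB := rowsB n n 0 []
    norm_num [pvFib] at hA hB
    rw [hA, hB]
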